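-- pv_equiv track=rewrite | github.com/siwenHT/workCode | cPlusCodeChange/OC/globalInfo.py | getLastWord
-- ===== SOURCE A (Python) =====
-- def getLastWord(name):
--     pos = -1
--     for i in range(len(name)):
--         if name[i].isupper():
--             pos = i
--
--     if pos > -1:
--         return name[pos:]
--     else:
--         return name
-- ===== SOURCE B (Python) =====
-- def getLastWord(name):
--     for i in range(len(name) - 1, -1, -1):
--         if name[i].isupper():
--             return name[i:]
--     return name
-- ===== Notes on version B (the rewrite author's own statement) =====
-- stated objective: idiomatic
-- what changed: Replaces A's full forward scan that keeps updating a last-uppercase position accumulator with a backward scan that returns the suffix immediately at the first uppercase character found from the right.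
import Mathlib
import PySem

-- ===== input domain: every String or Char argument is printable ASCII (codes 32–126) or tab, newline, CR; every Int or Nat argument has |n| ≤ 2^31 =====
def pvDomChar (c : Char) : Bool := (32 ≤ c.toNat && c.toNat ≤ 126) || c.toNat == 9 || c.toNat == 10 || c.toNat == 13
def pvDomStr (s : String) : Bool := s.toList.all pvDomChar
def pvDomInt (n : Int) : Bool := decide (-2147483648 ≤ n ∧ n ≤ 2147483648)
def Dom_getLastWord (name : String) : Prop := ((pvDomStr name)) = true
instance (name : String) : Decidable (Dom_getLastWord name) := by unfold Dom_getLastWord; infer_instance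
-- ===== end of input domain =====

-- B replaces A's forward scan that records the last uppercase position with a backward
-- scan that returns at the first uppercase character found (objective: idiomatic early exit).

-- ===== PORT A =====
-- forward loop: pos = last index i with name[i].isupper(), else -1
def aLoop (cs : List Char) : Int :=
  (PySem.List.pyRange 0 (cs.length : Int) 1).foldl
    (fun pos i => if PySem.Chars.isupper (PySem.List.pyGetD cs i ' ') then i else pos) (-1)

def getLastWord (name : String) : String :=
  if aLoop name.toList > -1 then
    String.ofList (PySem.List.slice name.toList (some (aLoop name.toList)) none)
  else name

-- ===== PORT B =====
-- backward loop 'for i in range(len(name)-1, -1, -1)': fuel = i+1, early return as Option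
def altLoop (cs : List Char) : Nat → Option (List Char)
  | 0 => none
  | i + 1 =>
    if PySem.Chars.isupper (PySem.List.pyGetD cs (i : Int) ' ') then
      some (PySem.List.slice cs (some (i : Int)) none)
    else altLoop cs i

def getLastWord_alt (name : String) : String :=
  match altLoop name.toList name.toList.length with
  | some suf => String.ofList suf
  | none => name

-- ===== PRECONDITION & SPEC =====
def Spec_getLastWord (name : String) (out : String) : Prop := out = getLastWord_alt name
instance (name : String) (out : String) : Decidable (Spec_getLastWord name out) := by unfold Spec_getLastWord; infer_instance

-- ===== CLAIM (what is proved, stated in full; the proofs are below) =====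
def Claim_equal_getLastWord : Prop := ∀ (name : String), Dom_getLastWord name → Spec_getLastWord name (getLastWord name)

-- ===== LEMMAS AND PROOFS =====

theorem aLoop_append (cs : List Char) (c : Char) :
    aLoop (cs ++ [c]) = if PySem.Chars.isupper c then (cs.length : Int) else aLoop cs := by
  unfold aLoop
  have hlen : ((cs ++ [c]).length : Int) = (cs.length : Int) + 1 := by
    simp [List.length_append]
  rw [hlen, PySem.List.pyRange_one_succ_right (by positivity), List.foldl_append]
  have hcongr :
      (PySem.List.pyRange 0 (cs.length : Int)).foldl
        (fun pos i => if PySem.Chars.isupper (PySem.List.pyGetD (cs ++ [c]) i ' ') then i else pos) (-1)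
      = (PySem.List.pyRange 0 (cs.length : Int)).foldl
        (fun pos i => if PySem.Chars.isupper (PySem.List.pyGetD cs i ' ') then i else pos) (-1) := by
    apply PySem.List.foldl_congr_mem
    intro acc x hx
    rcases PySem.List.mem_pyRange_one.mp hx with ⟨h0, hn⟩
    have hx1 : x.toNat < cs.length := by omega
    have hx2 : x.toNat < (cs ++ [c]).length := by simp; omega
    have hxe : x = ((x.toNat : Nat) : Int) := by omega
    rw [hxe, PySem.List.pyGetD_ofNat _ _ _ (by simpa using Nat.lt_succ_of_lt hx1),
        PySem.List.pyGetD_ofNat _ _ _ hx1, List.getElem_append_left hx1]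
  rw [hcongr]
  have hlast : PySem.List.pyGetD (cs ++ [c]) (cs.length : Int) ' ' = c := by
    rw [PySem.List.pyGetD_ofNat _ _ _ (by simp)]
    simp
  simp only [List.foldl_cons, List.foldl_nil, hlast]

theorem aLoop_bounds (cs : List Char) : -1 ≤ aLoop cs ∧ aLoop cs < (cs.length : Int) := by
  induction cs using List.reverseRecOn with
  | nil => simp [aLoop, PySem.List.pyRange_one_eq_nil]
  | append_singleton cs c ih =>
    rcases ih with ⟨h1, h2⟩
    rw [aLoop_append]
    split_ifs <;> simp only [List.length_append, List.length_cons, List.length_nil] <;>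
      push_cast <;> omega

theorem altLoop_append (cs : List Char) (c : Char) :
    ∀ i, i ≤ cs.length → altLoop (cs ++ [c]) i = (altLoop cs i).map (· ++ [c]) := by
  intro i
  induction i with
  | zero => intro _; simp [altLoop]
  | succ i ih =>
    intro hle
    have hi : i < cs.length := by omega
    unfold altLoop
    have hchar : PySem.List.pyGetD (cs ++ [c]) (i : Int) ' ' = PySem.List.pyGetD cs (i : Int) ' ' := by
      rw [PySem.List.pyGetD_ofNat _ _ _ (by simp; omega), PySem.List.pyGetD_ofNat _ _ _ hi]
      exact List.getElem_append_left hi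
    rw [hchar]
    split_ifs with h
    · rw [PySem.List.slice_from_natCast, PySem.List.slice_from_natCast,
          List.drop_append_of_le_length (by omega)]
      simp
    · exact ih (by omega)

theorem altLoop_eq_aLoop (cs : List Char) :
    altLoop cs cs.length =
      if aLoop cs > -1 then some (cs.drop (aLoop cs).toNat) else none := by
  induction cs using List.reverseRecOn with
  | nil => simp [altLoop, aLoop, PySem.List.pyRange_one_eq_nil]
  | append_singleton cs c ih =>
    have hlen : (cs ++ [c]).length = cs.length + 1 := by simp
    rw [hlen]
    unfold altLoop
    have hlast : PySem.List.pyGetD (cs ++ [c]) (cs.length : Int) ' ' = c := by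
      rw [PySem.List.pyGetD_ofNat _ _ _ (by simp)]
      simp
    rw [hlast, aLoop_append]
    split_ifs with h h2 h3
    · -- last char uppercase
      rw [PySem.List.slice_from_natCast, List.drop_append_of_le_length (by omega)]
      simp
    · omega
    · -- not uppercase, aLoop cs > -1
      have hb := (aLoop_bounds cs).2
      rw [altLoop_append cs c cs.length (le_refl _), ih, if_pos h3, Option.map_some,
          List.drop_append_of_le_length (by omega)]
    · -- not uppercase, aLoop cs = -1
      rw [altLoop_append cs c cs.length (le_refl _), ih]
      simp [h3]

-- ===== VERDICT (by name: the statement is the Claim_ definition above) =====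
theorem getLastWord_spec : Claim_equal_getLastWord := by
  intro name _
  unfold Spec_getLastWord getLastWord getLastWord_alt
  rw [altLoop_eq_aLoop]
  split_ifs with h
  · rw [PySem.List.slice_from _ (by omega)]
  · rfl
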